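-- pv_equiv track=rewrite | github.com/Nemika-Haj/WolframAlpha.py | wolfram/AsyncApp.py | fix_format
-- ===== SOURCE A (Python) =====
-- def fix_format(string):
--     keys = {
--         " ": "+",
--         "/": "\/",
--         "'": "\'",
--         '"': '\"',
--         "+": "%2B"
--     }
--
--     for key in keys:
--         string = string.replace(key, keys[key])
--     return string
-- ===== SOURCE B (Python) =====
-- def fix_format(string):
--     # chained replacements pre-collapsed into one lookup table, single pass
--     table = {" ": "%2B", "+": "%2B", "/": "\\/"}
--     return "".join(table.get(c, c) for c in string)
-- ===== Notes on version B (the rewrite author's own statement) =====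
-- stated objective: idiomatic
-- what changed: Five sequential whole-string .replace scans are collapsed into one pre-computed lookup table (space and plus both map to %2B, slash to backslash-slash, quotes stay identity) applied in a single character-by-character pass joined into the result.
import Mathlib
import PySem

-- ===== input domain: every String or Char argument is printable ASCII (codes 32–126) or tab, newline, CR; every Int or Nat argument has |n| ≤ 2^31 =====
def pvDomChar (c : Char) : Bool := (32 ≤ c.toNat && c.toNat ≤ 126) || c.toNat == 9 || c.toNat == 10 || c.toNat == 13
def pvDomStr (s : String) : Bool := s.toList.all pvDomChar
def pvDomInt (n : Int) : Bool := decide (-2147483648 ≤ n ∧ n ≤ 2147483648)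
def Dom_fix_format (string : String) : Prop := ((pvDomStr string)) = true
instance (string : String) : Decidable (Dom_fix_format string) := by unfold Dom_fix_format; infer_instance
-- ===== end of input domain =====

-- B collapses A's five sequential .replace scans into one lookup table applied in a single pass (idiomatic).

-- ===== PORT A =====
-- A iterates over the dict's keys in insertion order and applies string.replace for each.
def fix_format (string : String) : String :=
  let string := PySem.Str.replace string " " "+"
  let string := PySem.Str.replace string "/" "\\/"
  let string := PySem.Str.replace string "'" "'"
  let string := PySem.Str.replace string "\"" "\""
  let string := PySem.Str.replace string "+" "%2B"
  string

-- ===== PORT B =====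
-- table.get(c, c): first-match lookup in the literal dict, default the char itself
def pvTable : PySem.Dict Char (List Char) :=
  PySem.Dict.ofList [(' ', ['%', '2', 'B']), ('+', ['%', '2', 'B']), ('/', ['\\', '/'])]

def pvTableGet (c : Char) : List Char := pvTable.getD c [c]

def fix_format_alt (string : String) : String :=
  String.ofList (string.toList.flatMap pvTableGet)

-- ===== PRECONDITION & SPEC =====
def Spec_fix_format (string : String) (out : String) : Prop := out = fix_format_alt string
instance (string : String) (out : String) : Decidable (Spec_fix_format string out) := by unfold Spec_fix_format; infer_instance

-- ===== CLAIM (what is proved, stated in full; the proofs are below) =====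
def Claim_equal_fix_format : Prop := ∀ (string : String), Dom_fix_format string → Spec_fix_format string (fix_format string)

-- ===== LEMMAS AND PROOFS =====

-- Single-character replace is a flatMap over the characters.
theorem replace_go_single (a : Char) (new : List Char) :
    ∀ (fuel : Nat) (l acc : List Char), l.length ≤ fuel →
      PySem.Chars.replace.go [a] new fuel l acc
        = acc.reverse ++ l.flatMap (fun c => if c = a then new else [c]) := by
  intro fuel
  induction fuel with
  | zero =>
    intro l acc h
    have : l = [] := List.eq_nil_of_length_eq_zero (Nat.le_zero.mp h)
    subst this
    simp [PySem.Chars.replace.go]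
  | succ n ih =>
    intro l acc h
    cases l with
    | nil => simp [PySem.Chars.replace.go]
    | cons c t =>
      rw [PySem.Chars.replace.go]
      by_cases hc : c = a
      · subst hc
        have hp : List.isPrefixOf [c] (c :: t) = true := by
          simp [List.isPrefixOf]
        simp only [hp, if_pos]
        rw [ih _ _ (by simpa using Nat.le_of_succ_le_succ h)]
        simp
      · have hp : List.isPrefixOf [a] (c :: t) = false := by
          simp [List.isPrefixOf]
          exact fun hac => (hc hac.symm).elim
        simp only [hp, Bool.false_eq_true, if_neg, not_false_iff]
        rw [ih _ _ (by simpa using Nat.le_of_succ_le_succ h)]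
        simp [hc]

theorem replace_single (a : Char) (new s : List Char) :
    PySem.Chars.replace s [a] new = s.flatMap (fun c => if c = a then new else [c]) := by
  rw [PySem.Chars.replace]
  simp only [List.isEmpty_cons, Bool.false_eq_true, if_neg, not_false_iff]
  simpa using replace_go_single a new s.length s [] (le_refl _)

-- Pointwise collapse of the five chained substitutions into the table lookup.
theorem collapse_pointwise (c : Char) :
    ((((if c = ' ' then ['+'] else [c]).flatMap
        (fun c => if c = '/' then ['\\', '/'] else [c])).flatMap
        (fun c => if c = '\'' then ['\''] else [c])).flatMap
        (fun c => if c = '"' then ['"'] else [c])).flatMap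
        (fun c => if c = '+' then ['%', '2', 'B'] else [c])
      = pvTableGet c := by
  by_cases h1 : c = ' '
  · subst h1; decide
  by_cases h2 : c = '/'
  · subst h2; decide
  by_cases h3 : c = '+'
  · subst h3; decide
  by_cases h4 : c = '\''
  · subst h4; decide
  by_cases h5 : c = '"'
  · subst h5; decide
  · have hitems : pvTable.items
        = [(' ', ['%', '2', 'B']), ('+', ['%', '2', 'B']), ('/', ['\\', '/'])] := by decide
    have e1 : (' ' == c) = false := by simp [Ne.symm h1]
    have e2 : ('+' == c) = false := by simp [Ne.symm h3]
    have e3 : ('/' == c) = false := by simp [Ne.symm h2]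
    simp [h1, h2, h3, h4, h5, pvTableGet, PySem.Dict.getD, PySem.Dict.get?, hitems,
      List.find?, e1, e2, e3]

theorem chained_eq_flatMap (l : List Char) :
    ((((l.flatMap (fun c => if c = ' ' then ['+'] else [c])).flatMap
        (fun c => if c = '/' then ['\\', '/'] else [c])).flatMap
        (fun c => if c = '\'' then ['\''] else [c])).flatMap
        (fun c => if c = '"' then ['"'] else [c])).flatMap
        (fun c => if c = '+' then ['%', '2', 'B'] else [c])
      = l.flatMap pvTableGet := by
  induction l with
  | nil => simp
  | cons c t ih =>
    simp only [List.flatMap_cons, List.flatMap_append]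
    rw [ih, collapse_pointwise]

-- ===== VERDICT (by name: the statement is the Claim_ definition above) =====
theorem fix_format_spec : Claim_equal_fix_format := by
  intro s _
  show fix_format s = fix_format_alt s
  unfold fix_format fix_format_alt
  simp only [PySem.Str.replace, String.toList_ofList]
  rw [show (" ".toList) = [' '] from rfl, show ("+".toList) = ['+'] from rfl,
      show ("/".toList) = ['/'] from rfl, show ("\\/".toList) = ['\\', '/'] from rfl,
      show ("'".toList) = ['\''] from rfl, show ("\"".toList) = ['"'] from rfl,
      show ("%2B".toList) = ['%', '2', 'B'] from rfl]
  rw [replace_single, replace_single, replace_single, replace_single, replace_single]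
  rw [chained_eq_flatMap]
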